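-- pv_equiv track=rewrite | github.com/hacathondrift/docu-drift-demo | docu_drift_agent.py | index_readme_sections
-- ===== SOURCE A (Python) =====
-- def index_readme_sections(readme_text):
--     sections = {}
--     current_section = None
--
--     for line in readme_text.splitlines():
--         if line.startswith("## "):
--             current_section = line.replace("## ", "").strip()
--             sections[current_section] = []
--         elif current_section:
--             sections[current_section].append(line)
--
--     return {k: "\n".join(v) for k, v in sections.items()}
-- ===== SOURCE B (Python) =====
-- def _take_chunk(lines):
--     """Return (lines before the first '## ' header, remainder starting at that header)."""
--     for k, line in enumerate(lines):
--         if line.startswith("## "):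
--             return lines[:k], lines[k:]
--     return lines, []
--
--
-- def index_readme_sections(readme_text):
--     sections = {}
--     _, rest = _take_chunk(readme_text.splitlines())
--     while rest:
--         header, *tail = rest
--         body, rest = _take_chunk(tail)
--         sections[header.replace("## ", "").strip()] = "\n".join(body)
--     return sections
-- ===== Notes on version B (the rewrite author's own statement) =====
-- stated objective: alternative
-- what changed: Replaces A's stateful per-line fold (tracking current_section and appending each line into the section's dict entry) by a chunking decomposition: split the line list at each '## ' header and insert each header's joined body at once, in header order.
-- intended difference: On texts whose last level-two markdown header strips to an empty section name and is followed, before the next header, by body lines other than nothing or a single blank line, A silently drops that body and returns an empty string for the empty key (its truthiness test treats the empty name as no current section), while B maps the empty key to the joined body; B's value is intended because the test was clearly meant to check for None. — e.g. on index_readme_sections("## \nhello"): A returns [("", "")], B returns [("", "hello")]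
import Mathlib
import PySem

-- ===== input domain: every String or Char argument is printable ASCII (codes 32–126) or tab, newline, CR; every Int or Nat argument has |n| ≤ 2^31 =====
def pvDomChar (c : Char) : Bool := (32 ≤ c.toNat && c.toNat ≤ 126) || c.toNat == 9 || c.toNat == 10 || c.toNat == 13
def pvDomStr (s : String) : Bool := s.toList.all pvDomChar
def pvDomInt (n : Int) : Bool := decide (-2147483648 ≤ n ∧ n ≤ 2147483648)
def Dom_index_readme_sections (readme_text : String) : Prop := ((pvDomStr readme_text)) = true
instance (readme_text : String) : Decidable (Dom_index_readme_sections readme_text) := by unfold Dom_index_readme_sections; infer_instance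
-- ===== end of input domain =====

-- B replaces A's stateful per-line fold by a chunking decomposition (objective: alternative,
-- same cost); on the inputs described by D_ below A drops a section body and B keeps it; the
-- return values are proved equal on all other inputs.

-- shared by both Pythons verbatim: line.startswith("## ") and line.replace("## ", "").strip()
def pvIsHeader (line : String) : Bool := PySem.Str.startswith line "## "
def pvName (line : String) : String := PySem.Str.strip (PySem.Str.replace line "## " "")

-- ===== PORT A =====
-- loop body of A: state = (sections, current_section); `elif current_section:` is Python
-- truthiness: the branch fires only for a non-None, non-empty current_section.
def pvStepA (st : PySem.Dict String (List String) × Option String) (line : String) :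
    PySem.Dict String (List String) × Option String :=
  if pvIsHeader line then
    (st.1.insert (pvName line) [], some (pvName line))
  else
    match st.2 with
    | some c => if c ≠ "" then (st.1.modify c [] (· ++ [line]), st.2) else st
    | none => st

def index_readme_sections (readme_text : String) : List (String × String) :=
  (((PySem.Str.splitlines readme_text).foldl pvStepA (PySem.Dict.empty, none)).1.items).map
    (fun kv => (kv.1, PySem.Str.join "\n" kv.2))

-- ===== PORT B =====
-- _take_chunk: (lines before the first '## ' header, remainder starting at that header)
def takeChunk : List String → List String × List String
  | [] => ([], [])
  | l :: ls =>
    if pvIsHeader l then ([], l :: ls)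
    else
      let p := takeChunk ls
      (l :: p.1, p.2)

-- termination measure for loopB (cited in decreasing_by)
lemma takeChunk_snd_length_le (ls : List String) : (takeChunk ls).2.length ≤ ls.length := by
  induction ls with
  | nil => simp [takeChunk]
  | cons l ls ih =>
    by_cases h : pvIsHeader l = true
    · simp [takeChunk, h]
    · simp only [takeChunk, h, Bool.false_eq_true, if_false]
      exact le_trans ih (Nat.le_succ _)

-- the `while rest:` loop of B
def loopB : PySem.Dict String String → List String → PySem.Dict String String
  | sections, [] => sections
  | sections, header :: tail =>
    let p := takeChunk tail
    loopB (sections.insert (pvName header) (PySem.Str.join "\n" p.1)) p.2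
termination_by _ l => l.length
decreasing_by
  simpa using Nat.lt_succ_of_le (takeChunk_snd_length_le tail)

def index_readme_sections_alt (readme_text : String) : List (String × String) :=
  (loopB PySem.Dict.empty (takeChunk (PySem.Str.splitlines readme_text)).2).items

-- ===== PRECONDITION & SPEC =====
-- On texts whose last level-two markdown header strips to an empty section name and is
-- followed, before the next header, by body lines other than nothing or a single blank line,
-- A silently drops that body and returns an empty string for the empty key (its truthiness
-- test treats the empty name as no current section), while B maps the empty key to the joined
-- body; B's value is intended because the test was clearly meant to check for None.
def D_index_readme_sections (readme_text : String) : Prop :=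
  ∃ s ∈ (PySem.Str.splitlines readme_text).tails,
    pvIsHeader s.headI ∧ pvName s.headI = "" ∧
    (∀ l ∈ s.tail, pvIsHeader l → pvName l ≠ "") ∧
    s.tail.takeWhile (fun l => !pvIsHeader l) ∉ [[], [""]]
instance (readme_text : String) : Decidable (D_index_readme_sections readme_text) := by
  unfold D_index_readme_sections; infer_instance

def Spec_index_readme_sections (readme_text : String) (out : List (String × String)) : Prop :=
  ¬ D_index_readme_sections readme_text → out = index_readme_sections_alt readme_text
instance (readme_text : String) (out : List (String × String)) : Decidable (Spec_index_readme_sections readme_text out) := by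
  unfold Spec_index_readme_sections; infer_instance

def pvDiffWitness_index_readme_sections : String := "## \nhello"
def pvDiffWitnessOut_index_readme_sections : (List (String × String)) × (List (String × String)) :=
  ([("", "")], [("", "hello")])

-- ===== CLAIM (what is proved, stated in full; the proofs are below) =====
def Claim_unchanged_index_readme_sections : Prop := ∀ (readme_text : String), Dom_index_readme_sections readme_text → Spec_index_readme_sections readme_text (index_readme_sections readme_text)
def Claim_exact_index_readme_sections : Prop := ∀ (readme_text : String), Dom_index_readme_sections readme_text → D_index_readme_sections readme_text → index_readme_sections readme_text ≠ index_readme_sections_alt readme_text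
def Claim_changed_index_readme_sections : Prop := Dom_index_readme_sections (pvDiffWitness_index_readme_sections) ∧ D_index_readme_sections (pvDiffWitness_index_readme_sections) ∧ index_readme_sections (pvDiffWitness_index_readme_sections) = pvDiffWitnessOut_index_readme_sections.1 ∧ index_readme_sections_alt (pvDiffWitness_index_readme_sections) = pvDiffWitnessOut_index_readme_sections.2 ∧ pvDiffWitnessOut_index_readme_sections.1 ≠ pvDiffWitnessOut_index_readme_sections.2

-- ===== LEMMAS AND PROOFS =====

lemma dict_modify_eq_insert (d : PySem.Dict String (List String)) (c : String)
    (f : List String → List String) : d.modify c [] f = d.insert c (f (d.getD c [])) := by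
  simp [PySem.Dict.modify]

-- a key-preserving map over the items of a dict (instantiated twice below)
def mapValD {ν μ : Type} (f : String → ν → μ) (d : PySem.Dict String ν) : PySem.Dict String μ :=
  PySem.Dict.mk (d.items.map (fun kv => (kv.1, f kv.1 kv.2)))

lemma items_mapValD {ν μ : Type} (f : String → ν → μ) (d : PySem.Dict String ν) :
    (mapValD f d).items = d.items.map (fun kv => (kv.1, f kv.1 kv.2)) := rfl

lemma contains_mapValD {ν μ : Type} (f : String → ν → μ) (d : PySem.Dict String ν) (k : String) :
    (mapValD f d).contains k = d.contains k := by
  rw [PySem.Dict.contains_eq_decide_mem_keys, PySem.Dict.contains_eq_decide_mem_keys]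
  simp [PySem.Dict.keys, items_mapValD, List.map_map, Function.comp]

lemma mapValD_insert {ν μ : Type} (f : String → ν → μ) (d : PySem.Dict String ν) (k : String) (v : ν) :
    mapValD f (d.insert k v) = (mapValD f d).insert k (f k v) := by
  apply PySem.Dict.ext
  by_cases h : d.contains k = true
  · simp only [items_mapValD, PySem.Dict.items_insert, contains_mapValD, h, if_true, List.map_map]
    apply List.map_congr_left
    intro p _
    by_cases hp : p.1 = k <;> simp [Function.comp, hp]
  · simp [items_mapValD, PySem.Dict.items_insert, contains_mapValD, h, List.map_append]

-- the dict-comprehension at the end of A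
def mapJoinD (d : PySem.Dict String (List String)) : PySem.Dict String String :=
  mapValD (fun _ v => PySem.Str.join "\n" v) d

-- overwriting the value stored at key "" by "" (what A's dropped body amounts to)
def fixD (d : PySem.Dict String String) : PySem.Dict String String :=
  mapValD (fun k v => if k = "" then "" else v) d

lemma mapJoinD_insert (d : PySem.Dict String (List String)) (k : String) (v : List String) :
    mapJoinD (d.insert k v) = (mapJoinD d).insert k (PySem.Str.join "\n" v) :=
  mapValD_insert _ d k v

lemma fixD_insert (d : PySem.Dict String String) (k : String) (v : String) :
    fixD (d.insert k v) = (fixD d).insert k (if k = "" then "" else v) :=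
  mapValD_insert _ d k v

lemma fixD_eq_self (e : PySem.Dict String String) (hnd : e.keys.Nodup)
    (h : e.getD "" "" = "") : fixD e = e := by
  apply PySem.Dict.ext
  unfold fixD
  rw [items_mapValD]
  conv_rhs => rw [← List.map_id e.items]
  apply List.map_congr_left
  intro p hp
  by_cases hk : p.1 = ""
  · have hp' : (p.1, p.2) ∈ e.items := by rwa [Prod.mk.eta]
    have hv : e.getD p.1 "" = p.2 := PySem.Dict.getD_of_mem_items e hp' hnd ""
    rw [hk] at hv
    have hp2 : p.2 = "" := by rw [← hv, h]
    have hpe : p = ("", "") := Prod.ext hk hp2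
    rw [hpe]
    simp
  · simp [hk]

lemma join_nil_str : PySem.Str.join "\n" ([] : List String) = "" := by decide

lemma join_blank_str : PySem.Str.join "\n" ([""] : List String) = "" := by decide

lemma takeChunk_append (ls : List String) :
    (takeChunk ls).1 ++ (takeChunk ls).2 = ls := by
  induction ls with
  | nil => rfl
  | cons l ls ih =>
    by_cases h : pvIsHeader l = true
    · simp [takeChunk, h]
    · simp [takeChunk, h, ih]

lemma takeChunk_fst (ls : List String) :
    ∀ l ∈ (takeChunk ls).1, pvIsHeader l = false := by
  induction ls with
  | nil => simp [takeChunk]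
  | cons l ls ih =>
    by_cases h : pvIsHeader l = true
    · simp [takeChunk, h]
    · simp only [takeChunk, h, Bool.false_eq_true, if_false]
      intro x hx
      rcases List.mem_cons.mp hx with hx | hx
      · subst hx; simpa using h
      · exact ih x hx

lemma takeChunk_snd_head (ls : List String) {h : String} {t : List String}
    (he : (takeChunk ls).2 = h :: t) : pvIsHeader h = true := by
  induction ls with
  | nil => simp [takeChunk] at he
  | cons l ls ih =>
    by_cases hl : pvIsHeader l = true
    · simp only [takeChunk, hl, if_true] at he
      cases he
      exact hl
    · simp only [takeChunk, hl, Bool.false_eq_true, if_false] at he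
      exact ih he

lemma takeChunk_header {h : String} (tl : List String) (hh : pvIsHeader h = true) :
    takeChunk (h :: tl) = ([], h :: tl) := by
  simp [takeChunk, hh]

-- "starts with a header (or is empty)" — the shape of every remainder takeChunk produces
def hAligned (r : List String) : Prop := ∀ h t, r = h :: t → pvIsHeader h = true

lemma hAligned_takeChunk_snd (ls : List String) : hAligned (takeChunk ls).2 :=
  fun _ _ he => takeChunk_snd_head ls he

lemma takeChunk_of_aligned {r : List String} (hr : hAligned r) : takeChunk r = ([], r) := by
  cases r with
  | nil => rfl
  | cons h t => exact takeChunk_header t (hr h t rfl)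

lemma foldA_skip (pre xs : List String) (d : PySem.Dict String (List String))
    (hpre : ∀ l ∈ pre, pvIsHeader l = false) :
    (pre ++ xs).foldl pvStepA (d, none) = xs.foldl pvStepA (d, none) := by
  induction pre with
  | nil => rfl
  | cons l pre ih =>
    have hl := hpre l (List.mem_cons_self ..)
    simp only [List.cons_append, List.foldl_cons]
    rw [show pvStepA (d, none) l = (d, none) by simp [pvStepA, hl]]
    exact ih (fun x hx => hpre x (List.mem_cons_of_mem _ hx))

lemma foldA_body {c : String} (hc : c ≠ "") (body : List String) :
    ∀ (acc : List String) (d : PySem.Dict String (List String)),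
    (∀ l ∈ body, pvIsHeader l = false) →
    body.foldl pvStepA (d.insert c acc, some c) = (d.insert c (acc ++ body), some c) := by
  induction body with
  | nil => intro acc d _; simp
  | cons l body ih =>
    intro acc d hb
    have hl := hb l (List.mem_cons_self ..)
    rw [List.foldl_cons]
    have hstep : pvStepA (d.insert c acc, some c) l = (d.insert c (acc ++ [l]), some c) := by
      simp only [pvStepA, hl, Bool.false_eq_true, if_false]
      simp [hc, dict_modify_eq_insert, PySem.Dict.getD_insert_self, PySem.Dict.insert_insert_self]
    rw [hstep, ih (acc ++ [l]) d (fun x hx => hb x (List.mem_cons_of_mem _ hx))]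
    simp

lemma foldA_empty_section (body : List String) :
    ∀ (d : PySem.Dict String (List String)),
    (∀ l ∈ body, pvIsHeader l = false) →
    body.foldl pvStepA (d, some "") = (d, some "") := by
  induction body with
  | nil => intro d _; rfl
  | cons l body ih =>
    intro d hb
    have hl := hb l (List.mem_cons_self ..)
    rw [List.foldl_cons]
    rw [show pvStepA (d, some "") l = (d, some "") by simp [pvStepA, hl]]
    exact ih d (fun x hx => hb x (List.mem_cons_of_mem _ hx))

lemma foldA_headfix {r : List String} (hr : hAligned r)
    (d : PySem.Dict String (List String)) (c : Option String) :
    (r.foldl pvStepA (d, c)).1 = (r.foldl pvStepA (d, none)).1 := by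
  cases r with
  | nil => rfl
  | cons h t =>
    have hh := hr h t rfl
    simp only [List.foldl_cons]
    rw [show pvStepA (d, c) h = pvStepA (d, none) h by simp [pvStepA, hh]]

-- length bookkeeping shared by the fuel inductions below:
-- ls decomposes as (takeChunk ls).1 ++ h :: t, so (takeChunk t).2 is strictly shorter than ls
lemma fuel_step {ls : List String} {h : String} {t : List String} {n : Nat}
    (hre : (takeChunk ls).2 = h :: t) (hl : ls.length ≤ n + 1) :
    (takeChunk t).2.length ≤ n := by
  have e1 : (takeChunk ls).1.length + (takeChunk ls).2.length = ls.length := by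
    conv_rhs => rw [← takeChunk_append ls]
    simp
  have e3 : (takeChunk ls).2.length = t.length + 1 := by rw [hre]; simp
  have e2 := takeChunk_snd_length_le t
  omega

-- fixD (loopB e r) only depends on e through fixD e
lemma loopB_congr : ∀ (n : Nat) (r : List String), r.length ≤ n → hAligned r →
    ∀ (e₁ e₂ : PySem.Dict String String), fixD e₁ = fixD e₂ →
    fixD (loopB e₁ r) = fixD (loopB e₂ r) := by
  intro n
  induction n with
  | zero =>
    intro r hr _ e₁ e₂ he
    have : r = [] := List.eq_nil_of_length_eq_zero (Nat.le_zero.mp hr)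
    subst this
    simpa [loopB] using he
  | succ n ih =>
    intro r hr hal e₁ e₂ he
    cases r with
    | nil => simpa [loopB] using he
    | cons h t =>
      rw [loopB, loopB]
      have hre : (takeChunk (h :: t)).2 = h :: t := by
        rw [takeChunk_of_aligned hal]
      exact ih (takeChunk t).2 (fuel_step hre hr) (hAligned_takeChunk_snd t) _ _
        (by rw [fixD_insert, fixD_insert, he])

-- keys of loopB's result stay duplicate-free
lemma nodup_loopB : ∀ (n : Nat) (r : List String), r.length ≤ n →
    ∀ (e : PySem.Dict String String), e.keys.Nodup → (loopB e r).keys.Nodup := by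
  intro n
  induction n with
  | zero =>
    intro r hr e he
    have : r = [] := List.eq_nil_of_length_eq_zero (Nat.le_zero.mp hr)
    subst this
    simpa [loopB] using he
  | succ n ih =>
    intro r hr e he
    cases r with
    | nil => simpa [loopB] using he
    | cons h t =>
      rw [loopB]
      by_cases hal : hAligned (h :: t)
      · have hre : (takeChunk (h :: t)).2 = h :: t := by rw [takeChunk_of_aligned hal]
        exact ih (takeChunk t).2 (fuel_step hre hr) _ (PySem.Dict.nodup_keys_insert _ _ _ he)
      · -- length bound without alignment: (takeChunk t).2 is no longer than t
        exact ih (takeChunk t).2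
          (le_trans (takeChunk_snd_length_le t) (by simpa using Nat.le_of_succ_le_succ hr)) _
          (PySem.Dict.nodup_keys_insert _ _ _ he)

-- takeChunk is takeWhile/dropWhile of "not a header"
lemma takeChunk_fst_eq (ls : List String) :
    (takeChunk ls).1 = ls.takeWhile (fun l => !pvIsHeader l) := by
  induction ls with
  | nil => rfl
  | cons l ls ih =>
    by_cases h : pvIsHeader l = true
    · simp [takeChunk, h]
    · simp [takeChunk, h, ih]

lemma takeChunk_snd_eq (ls : List String) :
    (takeChunk ls).2 = ls.dropWhile (fun l => !pvIsHeader l) := by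
  induction ls with
  | nil => rfl
  | cons l ls ih =>
    by_cases h : pvIsHeader l = true
    · simp [takeChunk, h]
    · simp [takeChunk, h, ih]

-- proof-side description of B's overwrites at key "": the chunk of the LAST empty-named header
def lastEC : List String → Option (List String)
  | [] => none
  | h :: t =>
    match lastEC (takeChunk t).2 with
    | some c => some c
    | none => if pvName h = "" then some (takeChunk t).1 else none
termination_by l => l.length
decreasing_by
  simpa using Nat.lt_succ_of_le (takeChunk_snd_length_le t)

-- the value loopB leaves at key "" is the join of lastEC's chunk
lemma loopB_empty_key : ∀ (n : Nat) (r : List String), r.length ≤ n → hAligned r →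
    ∀ (e : PySem.Dict String String),
    (loopB e r).getD "" "" =
      match lastEC r with
      | some c => PySem.Str.join "\n" c
      | none => e.getD "" "" := by
  intro n
  induction n with
  | zero =>
    intro r hr _ e
    have : r = [] := List.eq_nil_of_length_eq_zero (Nat.le_zero.mp hr)
    subst this
    rw [loopB, lastEC]
  | succ n ih =>
    intro r hr hal e
    cases r with
    | nil => rw [loopB, lastEC]
    | cons h t =>
      have hre : (takeChunk (h :: t)).2 = h :: t := by rw [takeChunk_of_aligned hal]
      rw [loopB, lastEC,
        ih (takeChunk t).2 (fuel_step hre hr) (hAligned_takeChunk_snd t)]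
      cases hz : lastEC (takeChunk t).2 with
      | some c => rfl
      | none =>
        by_cases hn : pvName h = ""
        · show (e.insert (pvName h) _).getD "" "" = _
          rw [hn, PySem.Dict.getD_insert_self]
          simp
        · show (e.insert (pvName h) _).getD "" "" = _
          rw [PySem.Dict.getD_insert, if_neg (fun hq => hn hq.symm), if_neg hn]

-- lastEC r = none means r carries no empty-named header
lemma lastEC_none : ∀ (n : Nat) (r : List String), r.length ≤ n → hAligned r →
    lastEC r = none → ∀ l ∈ r, pvIsHeader l = true → pvName l ≠ "" := by
  intro n
  induction n with
  | zero =>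
    intro r hr _ _ l hl
    have : r = [] := List.eq_nil_of_length_eq_zero (Nat.le_zero.mp hr)
    subst this
    simp at hl
  | succ n ih =>
    intro r hr hal hnone l hl hhd
    cases r with
    | nil => simp at hl
    | cons h t =>
      have hre : (takeChunk (h :: t)).2 = h :: t := by rw [takeChunk_of_aligned hal]
      rw [lastEC] at hnone
      cases hz : lastEC (takeChunk t).2 with
      | some c => rw [hz] at hnone; simp at hnone
      | none =>
        rw [hz] at hnone
        have hn : pvName h ≠ "" := by
          intro hq
          rw [if_pos hq] at hnone
          simp at hnone
        rcases List.mem_cons.mp hl with hl | hl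
        · subst hl; exact hn
        · have : l ∈ (takeChunk t).1 ++ (takeChunk t).2 := by rw [takeChunk_append]; exact hl
          rcases List.mem_append.mp this with hc | hc
          · exact absurd hhd (by simp [takeChunk_fst t l hc])
          · exact ih (takeChunk t).2 (fuel_step hre hr) (hAligned_takeChunk_snd t) hz l hc hhd

-- a nontrivial lastEC chunk of a suffix of L yields a D_-witness over L
lemma lastEC_D : ∀ (n : Nat) (r L : List String), r.length ≤ n → hAligned r → r <:+ L →
    ∀ c, lastEC r = some c → c ≠ [] → c ≠ [""] →
    ∃ s ∈ L.tails,
      pvIsHeader s.headI = true ∧ pvName s.headI = "" ∧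
      (∀ l ∈ s.tail, pvIsHeader l = true → pvName l ≠ "") ∧
      s.tail.takeWhile (fun l => !pvIsHeader l) ∉ [[], [""]] := by
  intro n
  induction n with
  | zero =>
    intro r L hr _ _ c hsome
    have : r = [] := List.eq_nil_of_length_eq_zero (Nat.le_zero.mp hr)
    subst this
    rw [lastEC] at hsome
    simp at hsome
  | succ n ih =>
    intro r L hr hal hsuf c hsome hc1 hc2
    cases r with
    | nil => rw [lastEC] at hsome; simp at hsome
    | cons h t =>
      have hre : (takeChunk (h :: t)).2 = h :: t := by rw [takeChunk_of_aligned hal]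
      rw [lastEC] at hsome
      cases hz : lastEC (takeChunk t).2 with
      | some c' =>
        rw [hz] at hsome
        have hcc : c' = c := by simpa using hsome
        subst hcc
        have hsuf2 : (takeChunk t).2 <:+ L := by
          rw [takeChunk_snd_eq]
          exact (List.dropWhile_suffix _).trans ((List.suffix_cons h t).trans hsuf)
        exact ih (takeChunk t).2 L (fuel_step hre hr) (hAligned_takeChunk_snd t) hsuf2 c' hz hc1 hc2
      | none =>
        rw [hz] at hsome
        have hn : pvName h = "" := by
          by_contra hq
          rw [if_neg hq] at hsome
          simp at hsome
        have hcv : (takeChunk t).1 = c := by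
          rw [if_pos hn] at hsome
          simpa using hsome
        refine ⟨h :: t, (List.mem_tails _ _).mpr hsuf, ?_, ?_, ?_, ?_⟩
        · simpa using hal h t rfl
        · simpa using hn
        · intro l hl hhd
          simp only [List.tail_cons] at hl
          have : l ∈ (takeChunk t).1 ++ (takeChunk t).2 := by rw [takeChunk_append]; exact hl
          rcases List.mem_append.mp this with hcm | hcm
          · exact absurd hhd (by simp [takeChunk_fst t l hcm])
          · exact lastEC_none (takeChunk t).2.length _ le_rfl (hAligned_takeChunk_snd t) hz l hcm hhd
        · simp only [List.tail_cons]
          rw [← takeChunk_fst_eq, hcv]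
          simp [hc1, hc2]

-- A's final dict is B's final dict with the value at key "" overwritten by ""
lemma main_loop : ∀ (n : Nat) (ls : List String) (d : PySem.Dict String (List String)),
    ls.length ≤ n → fixD (mapJoinD d) = mapJoinD d →
    mapJoinD (ls.foldl pvStepA (d, none)).1 = fixD (loopB (mapJoinD d) (takeChunk ls).2) := by
  intro n
  induction n with
  | zero =>
    intro ls d hl hfix
    have : ls = [] := List.eq_nil_of_length_eq_zero (Nat.le_zero.mp hl)
    subst this
    simp [takeChunk, loopB, hfix]
  | succ n ih =>
    intro ls d hl hfix
    have hdecomp := takeChunk_append ls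
    have hA : ls.foldl pvStepA (d, none) = (takeChunk ls).2.foldl pvStepA (d, none) := by
      conv_lhs => rw [← hdecomp]
      exact foldA_skip _ _ d (takeChunk_fst ls)
    rw [hA]
    cases hre : (takeChunk ls).2 with
    | nil => simp [loopB, hfix]
    | cons h t =>
      have hh : pvIsHeader h = true := takeChunk_snd_head ls hre
      have hstep : pvStepA (d, none) h = (d.insert (pvName h) [], some (pvName h)) := by
        simp [pvStepA, hh]
      have ht := takeChunk_append t
      have hbody := takeChunk_fst t
      have hal2 := hAligned_takeChunk_snd t
      have hsplit_r2 : takeChunk (takeChunk t).2 = ([], (takeChunk t).2) :=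
        takeChunk_of_aligned hal2
      have hlen := fuel_step hre hl
      have cB : loopB (mapJoinD d) (h :: t) =
          loopB ((mapJoinD d).insert (pvName h) (PySem.Str.join "\n" (takeChunk t).1))
            (takeChunk t).2 := by
        rw [loopB]
      by_cases hnm : pvName h = ""
      · -- A drops the body; B records it; fixD erases the discrepancy at key ""
        have c2 : t.foldl pvStepA (d.insert (pvName h) [], some (pvName h)) =
            (takeChunk t).2.foldl pvStepA (d.insert (pvName h) [], some (pvName h)) := by
          conv_lhs => rw [← ht]
          rw [List.foldl_append, hnm, foldA_empty_section _ _ hbody]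
        have hfix' : fixD (mapJoinD (d.insert (pvName h) [])) = mapJoinD (d.insert (pvName h) []) := by
          rw [mapJoinD_insert, fixD_insert, hfix, hnm, join_nil_str]
          simp
        rw [List.foldl_cons, hstep, c2,
          show ((takeChunk t).2.foldl pvStepA (d.insert (pvName h) [], some (pvName h))).1
             = ((takeChunk t).2.foldl pvStepA (d.insert (pvName h) [], none)).1 from
            foldA_headfix hal2 _ _,
          ih (takeChunk t).2 (d.insert (pvName h) []) hlen hfix', hsplit_r2, cB]
        apply loopB_congr (takeChunk t).2.length _ le_rfl hal2
        rw [mapJoinD_insert, fixD_insert, fixD_insert, hnm, join_nil_str]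
        simp
      · have c2 : t.foldl pvStepA (d.insert (pvName h) [], some (pvName h)) =
            (takeChunk t).2.foldl pvStepA (d.insert (pvName h) (takeChunk t).1, some (pvName h)) := by
          conv_lhs => rw [← ht]
          rw [List.foldl_append, foldA_body hnm _ [] d hbody]
          simp
        have hfix' : fixD (mapJoinD (d.insert (pvName h) (takeChunk t).1)) =
            mapJoinD (d.insert (pvName h) (takeChunk t).1) := by
          rw [mapJoinD_insert, fixD_insert, hfix]
          simp [hnm]
        rw [List.foldl_cons, hstep, c2,
          show ((takeChunk t).2.foldl pvStepA (d.insert (pvName h) (takeChunk t).1, some (pvName h))).1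
             = ((takeChunk t).2.foldl pvStepA (d.insert (pvName h) (takeChunk t).1, none)).1 from
            foldA_headfix hal2 _ _,
          ih (takeChunk t).2 (d.insert (pvName h) (takeChunk t).1) hlen hfix', hsplit_r2, cB,
          mapJoinD_insert]

-- converse direction of lastEC_none: without empty-named headers, lastEC is none
lemma lastEC_none_of : ∀ (n : Nat) (r : List String), r.length ≤ n → hAligned r →
    (∀ l ∈ r, pvIsHeader l = true → pvName l ≠ "") → lastEC r = none := by
  intro n
  induction n with
  | zero =>
    intro r hr _ _
    have : r = [] := List.eq_nil_of_length_eq_zero (Nat.le_zero.mp hr)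
    subst this
    rw [lastEC]
  | succ n ih =>
    intro r hr hal hno
    cases r with
    | nil => rw [lastEC]
    | cons h t =>
      have hre : (takeChunk (h :: t)).2 = h :: t := by rw [takeChunk_of_aligned hal]
      have hsub : ∀ l ∈ (takeChunk t).2, pvIsHeader l = true → pvName l ≠ "" := by
        intro l hl
        refine hno l (List.mem_cons_of_mem _ ?_)
        rw [← takeChunk_append t]
        exact List.mem_append_right _ hl
      rw [lastEC, ih (takeChunk t).2 (fuel_step hre hr) (hAligned_takeChunk_snd t) hsub]
      have hn : pvName h ≠ "" := hno h (List.mem_cons_self ..) (hal h t rfl)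
      show (if pvName h = "" then some (takeChunk t).1 else none) = none
      rw [if_neg hn]

-- a suffix that starts with a header line passes the non-header prefix
lemma suffix_skip (pre rest s : List String) (hpre : ∀ l ∈ pre, pvIsHeader l = false)
    (hs : s <:+ pre ++ rest) (hhd : pvIsHeader s.headI = true) : s <:+ rest := by
  induction pre with
  | nil => simpa using hs
  | cons p pre ih =>
    rcases List.suffix_cons_iff.mp hs with heq | hs'
    · exfalso
      rw [heq] at hhd
      simp only [List.headI] at hhd
      exact absurd hhd (by simp [hpre p (List.mem_cons_self ..)])
    · exact ih (fun x hx => hpre x (List.mem_cons_of_mem _ hx)) hs'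

-- a D_-witness pins lastEC down
lemma lastEC_last : ∀ (n : Nat) (r : List String), r.length ≤ n → hAligned r →
    ∀ (h : String) (t' : List String), (h :: t') <:+ r → pvIsHeader h = true → pvName h = "" →
    (∀ l ∈ t', pvIsHeader l = true → pvName l ≠ "") →
    lastEC r = some (takeChunk t').1 := by
  intro n
  induction n with
  | zero =>
    intro r hr _ h t' hsuf
    have : r = [] := List.eq_nil_of_length_eq_zero (Nat.le_zero.mp hr)
    subst this
    simp at hsuf
  | succ n ih =>
    intro r hr hal h t' hsuf hhd hnm htl
    cases r with
    | nil => simp at hsuf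
    | cons h0 t0 =>
      have hre : (takeChunk (h0 :: t0)).2 = h0 :: t0 := by rw [takeChunk_of_aligned hal]
      rcases List.suffix_cons_iff.mp hsuf with heq | hsuf'
      · injection heq.symm with e1 e2
        subst e1
        subst e2
        have hsub : ∀ l ∈ (takeChunk t0).2, pvIsHeader l = true → pvName l ≠ "" := by
          intro l hl
          refine htl l ?_
          rw [← takeChunk_append t0]
          exact List.mem_append_right _ hl
        rw [lastEC, lastEC_none_of (takeChunk t0).2.length _ le_rfl
          (hAligned_takeChunk_snd t0) hsub]
        show (if pvName h0 = "" then some (takeChunk t0).1 else none) = some (takeChunk t0).1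
        rw [if_pos hnm]
      · have hsuf2 : (h :: t') <:+ (takeChunk t0).2 := by
          refine suffix_skip (takeChunk t0).1 _ _ (takeChunk_fst t0) ?_ (by simpa using hhd)
          rw [takeChunk_append]
          exact hsuf'
        rw [lastEC, ih (takeChunk t0).2 (fuel_step hre hr) (hAligned_takeChunk_snd t0)
          h t' hsuf2 hhd hnm htl]

-- joining a chunk other than [] or [""] cannot give ""
lemma join_nontrivial (c : List String) (h1 : c ≠ []) (h2 : c ≠ [""]) :
    PySem.Str.join "\n" c ≠ "" := by
  intro he
  have ht : (PySem.Str.join "\n" c).toList = [] := by rw [he]; rfl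
  rw [PySem.Str.toList_join] at ht
  match c, h1, h2 with
  | [x], _, h2 =>
    rw [List.map_cons, List.map_nil, PySem.Chars.join_singleton] at ht
    exact h2 (by rw [String.toList_eq_nil_iff.mp ht])
  | x :: y :: r, _, _ =>
    rw [List.map_cons, List.map_cons, PySem.Chars.join_cons_cons] at ht
    simp at ht

-- a dict whose value at key "" is not "" is changed by fixD
lemma fixD_ne_self (e : PySem.Dict String String)
    (h : e.getD "" "" ≠ "") : fixD e ≠ e := by
  intro heq
  have hcont : e.contains "" = true := by
    by_contra hc
    exact h (PySem.Dict.getD_of_not_contains e "" (by simpa using hc))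
  obtain ⟨v, hv⟩ : ∃ v, e.get? "" = some v := by
    have := PySem.Dict.contains_eq_isSome_get? (d := e) (k := "")
    rw [hcont] at this
    exact Option.isSome_iff_exists.mp this.symm
  have hvne : v ≠ "" := by
    intro hq
    exact h (by rw [PySem.Dict.getD_eq_get?_getD, hv, hq]; rfl)
  have hmem : ("", v) ∈ e.items := PySem.Dict.mem_items_of_get?_eq_some e hv
  have hit : e.items.map (fun kv => (kv.1, if kv.1 = "" then "" else kv.2)) = e.items := by
    have := congrArg PySem.Dict.items heq
    rwa [show (fixD e).items = e.items.map (fun kv => (kv.1, if kv.1 = "" then "" else kv.2))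
      from rfl] at this
  obtain ⟨i, hi, hgi⟩ := List.mem_iff_getElem.mp hmem
  have h1 : (e.items.map (fun kv => (kv.1, if kv.1 = "" then "" else kv.2)))[i]? =
      e.items[i]? := by rw [hit]
  rw [List.getElem?_map, List.getElem?_eq_getElem hi, hgi] at h1
  simp at h1
  exact hvne h1

-- ===== VERDICT (by name: the statements are the Claim_ definitions above) =====
theorem index_readme_sections_spec : Claim_unchanged_index_readme_sections := by
  intro t _
  unfold Spec_index_readme_sections
  intro hD
  have hmain := main_loop (PySem.Str.splitlines t).length (PySem.Str.splitlines t)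
    PySem.Dict.empty le_rfl rfl
  have hA : index_readme_sections t =
      (mapJoinD ((PySem.Str.splitlines t).foldl pvStepA (PySem.Dict.empty, none)).1).items := rfl
  set Bdict := loopB PySem.Dict.empty (takeChunk (PySem.Str.splitlines t)).2 with hBdict
  have hzero : Bdict.getD "" "" = "" := by
    rw [hBdict, loopB_empty_key (takeChunk (PySem.Str.splitlines t)).2.length _ le_rfl
      (hAligned_takeChunk_snd _)]
    cases hz : lastEC (takeChunk (PySem.Str.splitlines t)).2 with
    | none => rfl
    | some c =>
      simp only []
      have hc : ¬ (c ≠ [] ∧ c ≠ [""]) := by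
        intro hcc
        refine hD ?_
        refine lastEC_D (takeChunk (PySem.Str.splitlines t)).2.length _ _ le_rfl
          (hAligned_takeChunk_snd _) ?_ c hz hcc.1 hcc.2
        rw [takeChunk_snd_eq]
        exact List.dropWhile_suffix _
      rcases not_and_or.mp hc with hc | hc
      · rw [not_not.mp hc, join_nil_str]
      · rw [not_not.mp hc, join_blank_str]
  have hnd : Bdict.keys.Nodup := by
    rw [hBdict]
    exact nodup_loopB (takeChunk (PySem.Str.splitlines t)).2.length _ le_rfl _
      (PySem.Dict.nodup_keys_empty)
  have hfixB : fixD Bdict = Bdict := fixD_eq_self Bdict hnd hzero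
  show index_readme_sections t = Bdict.items
  rw [hA, show mapJoinD PySem.Dict.empty = PySem.Dict.empty from rfl] at *
  rw [hA, hmain, ← hBdict, hfixB]

theorem index_readme_sections_changed : Claim_changed_index_readme_sections := by
  unfold Claim_changed_index_readme_sections
  refine ⟨by decide, by decide, by decide, ?_, by decide⟩
  show index_readme_sections_alt pvDiffWitness_index_readme_sections =
    pvDiffWitnessOut_index_readme_sections.2
  unfold index_readme_sections_alt pvDiffWitness_index_readme_sections
  rw [show PySem.Str.splitlines "## \nhello" = ["## ", "hello"] from by decide,
    show takeChunk ["## ", "hello"] = ([], ["## ", "hello"]) from by decide]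
  rw [loopB]
  rw [show (takeChunk ["hello"]).2 = [] from by decide,
    show (takeChunk ["hello"]).1 = ["hello"] from by decide]
  rw [loopB]
  decide

theorem index_readme_sections_tight : Claim_exact_index_readme_sections := by
  intro t _ hD heq
  obtain ⟨s, hstails, hhd, hnm, htl, hchunk⟩ := hD
  have hsne : s ≠ [] := by
    intro h0
    rw [h0] at hhd
    exact absurd hhd (by decide)
  obtain ⟨h, t', rfl⟩ := List.exists_cons_of_ne_nil hsne
  simp only [List.headI, List.tail_cons] at hhd hnm hchunk
  have hsuf : (h :: t') <:+ PySem.Str.splitlines t := (List.mem_tails _ _).mp hstails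
  have hsuf2 : (h :: t') <:+ (takeChunk (PySem.Str.splitlines t)).2 := by
    refine suffix_skip (takeChunk (PySem.Str.splitlines t)).1 _ _
      (takeChunk_fst _) ?_ (by simpa using hhd)
    rw [takeChunk_append]
    exact hsuf
  have hlast : lastEC (takeChunk (PySem.Str.splitlines t)).2 = some (takeChunk t').1 :=
    lastEC_last (takeChunk (PySem.Str.splitlines t)).2.length _ le_rfl
      (hAligned_takeChunk_snd _) h t' hsuf2 hhd hnm htl
  have hc : (takeChunk t').1 ≠ [] ∧ (takeChunk t').1 ≠ [""] := by
    rw [takeChunk_fst_eq]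
    simpa using hchunk
  set Bdict := loopB PySem.Dict.empty (takeChunk (PySem.Str.splitlines t)).2 with hBdict
  have hval : Bdict.getD "" "" ≠ "" := by
    rw [hBdict, loopB_empty_key (takeChunk (PySem.Str.splitlines t)).2.length _ le_rfl
      (hAligned_takeChunk_snd _), hlast]
    exact join_nontrivial _ hc.1 hc.2
  refine fixD_ne_self Bdict hval (PySem.Dict.ext ?_)
  have hmain := main_loop (PySem.Str.splitlines t).length (PySem.Str.splitlines t)
    PySem.Dict.empty le_rfl rfl
  rw [show mapJoinD PySem.Dict.empty = PySem.Dict.empty from rfl] at hmain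
  have hA : index_readme_sections t =
      (mapJoinD ((PySem.Str.splitlines t).foldl pvStepA (PySem.Dict.empty, none)).1).items := rfl
  rw [hA, hmain] at heq
  exact heq
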